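-- pv_equiv track=rewrite | github.com/jeremyVienne/TP_Python_Licence | tp-experimentateur_Vienne_Lecornet/src/test.py | negative_markers1
-- ===== SOURCE A (Python) =====
-- def negative_markers1(markers,positive):
--     """
--     Computes the list of negative markers from the list of markers and
--     the list of positive markers.
--
--     :param markers: The list of markers
--     :type markers: List of String
--     :param positive: The list of positive markers
--     :type positive: List of String
--     :return: The list of negative markers
--     :rtype: List of String
--     """
--     negative = []
--     inc=0
--     for m in markers:
--
--         for p in positive:
--             inc+=1
--             if (m==p):
--                 return inc,negative
--
--         negative.append(m)
--
--     return inc,negative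
-- ===== SOURCE B (Python) =====
-- def negative_markers1(markers, positive):
--     # First-occurrence index of each positive marker, built once; the
--     # comparison counter is then computed arithmetically.
--     first = {}
--     for j, p in enumerate(positive):
--         if p not in first:
--             first[p] = j
--     P = len(positive)
--     for k, m in enumerate(markers):
--         j = first.get(m)
--         if j is not None:
--             return k * P + j + 1, markers[:k]
--     return len(markers) * P, list(markers)
-- ===== Notes on version B (the rewrite author's own statement) =====
-- stated objective: alternative
-- what changed: Replaces A's nested rescans of positive by a dict of first-occurrence indices built once, computing A's comparison counter arithmetically as k*len(positive)+j+1 and the negatives as markers[:k]; worst-case O(M+P) vs A's O(M*P), but A's early exit makes it comparable on typical inputs.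
import Mathlib
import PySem

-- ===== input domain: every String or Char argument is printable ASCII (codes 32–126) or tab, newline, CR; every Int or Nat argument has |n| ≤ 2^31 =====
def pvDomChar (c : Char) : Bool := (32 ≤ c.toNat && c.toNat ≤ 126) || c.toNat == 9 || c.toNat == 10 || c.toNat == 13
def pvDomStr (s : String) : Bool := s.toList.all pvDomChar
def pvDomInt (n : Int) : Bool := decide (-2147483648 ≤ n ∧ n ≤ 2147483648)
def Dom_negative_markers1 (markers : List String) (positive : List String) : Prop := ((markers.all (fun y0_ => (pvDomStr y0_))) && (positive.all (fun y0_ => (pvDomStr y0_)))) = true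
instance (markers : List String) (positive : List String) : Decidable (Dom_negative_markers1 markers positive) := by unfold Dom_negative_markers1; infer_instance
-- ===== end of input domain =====

-- B replaces A's nested rescans of `positive` by a first-occurrence-index dict built once,
-- computing the comparison counter arithmetically (objective: alternative algorithm).

-- ===== PORT A =====
-- inner `for p in positive: inc += 1; if m == p: return`
def pvInnerA (m : String) (ps : List String) (inc : Int) : Int × Bool :=
  match ps with
  | [] => (inc, false)
  | p :: rest =>
    let inc' := inc + 1
    if m == p then (inc', true) else pvInnerA m rest inc'

-- outer `for m in markers`
def pvLoopA (ms : List String) (positive : List String) (inc : Int) (neg : List String) : Int × List String :=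
  match ms with
  | [] => (inc, neg)
  | m :: rest =>
    let r := pvInnerA m positive inc
    if r.2 then (r.1, neg) else pvLoopA rest positive r.1 (neg ++ [m])

def negative_markers1 (markers : List String) (positive : List String) : Int × List String :=
  pvLoopA markers positive 0 []

-- ===== PORT B =====
-- `for j, p in enumerate(positive): if p not in first: first[p] = j`
def pvBuildFirst (pairs : List (Int × String)) (d : PySem.Dict String Int) : PySem.Dict String Int :=
  match pairs with
  | [] => d
  | (j, p) :: rest =>
    pvBuildFirst rest (if (d.get? p).isSome then d else d.insert p j)

-- `for k, m in enumerate(markers): j = first.get(m); if j is not None: return …`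
def pvFindB (d : PySem.Dict String Int) (P : Int) (markers : List String)
    (ms : List String) (k : Nat) : Int × List String :=
  match ms with
  | [] => ((markers.length : Int) * P, markers)
  | m :: rest =>
    match d.get? m with
    | some j => ((k : Int) * P + j + 1, markers.take k)
    | none => pvFindB d P markers rest (k + 1)

def negative_markers1_alt (markers : List String) (positive : List String) : Int × List String :=
  let first := pvBuildFirst (PySem.List.enumerate positive 0) PySem.Dict.empty
  pvFindB first (positive.length : Int) markers markers 0

-- ===== PRECONDITION & SPEC =====
def Spec_negative_markers1 (markers : List String) (positive : List String) (out : Int × List String) : Prop := out = negative_markers1_alt markers positive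
instance (markers : List String) (positive : List String) (out : Int × List String) : Decidable (Spec_negative_markers1 markers positive out) := by unfold Spec_negative_markers1; infer_instance

-- ===== CLAIM (what is proved, stated in full; the proofs are below) =====
def Claim_equal_negative_markers1 : Prop := ∀ (markers : List String) (positive : List String), Dom_negative_markers1 markers positive → Spec_negative_markers1 markers positive (negative_markers1 markers positive)

-- ===== LEMMAS AND PROOFS =====

-- the dict built from `enumerate positive s` looks up the first occurrence index (offset by s)
lemma buildFirst_get? (m : String) (ps : List String) : ∀ (s : Int) (d : PySem.Dict String Int),
    (pvBuildFirst (PySem.List.enumerate ps s) d).get? m =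
      if (d.get? m).isSome then d.get? m
      else (PySem.List.index? ps m).map (fun j => s + (j : Int)) := by
  induction ps with
  | nil =>
    intro s d
    cases hd : d.get? m <;>
      simp [PySem.List.enumerate_nil, pvBuildFirst, hd, PySem.List.index?_eq_idxOf?]
  | cons p rest ih =>
    intro s d
    rw [PySem.List.enumerate_cons]
    simp only [pvBuildFirst]
    rw [ih]
    by_cases hmp : m = p
    · subst hmp
      rw [PySem.List.index?_cons_self]
      cases hd : d.get? m with
      | some v => simp [hd]
      | none =>
        have h1 : ((d.insert m s).get? m) = some s := PySem.Dict.get?_insert_self d m s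
        simp [h1]
    · rw [PySem.List.index?_cons_of_ne _ (Ne.symm hmp)]
      have hne : (if (d.get? p).isSome then d else d.insert p s).get? m = d.get? m := by
        split
        · rfl
        · exact PySem.Dict.get?_insert_of_ne _ _ hmp
      rw [hne]
      cases d.get? m with
      | some v => simp
      | none =>
        cases PySem.List.index? rest m with
        | none => simp
        | some j => simp; ring

-- A's inner loop in terms of the first-occurrence index
lemma innerA_eq (m : String) : ∀ (ps : List String) (inc : Int),
    pvInnerA m ps inc =
      match PySem.List.index? ps m with
      | some j => (inc + (j : Int) + 1, true)
      | none => (inc + (ps.length : Int), false) := by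
  intro ps
  induction ps with
  | nil => intro inc; simp [pvInnerA, PySem.List.index?_eq_idxOf?]
  | cons p rest ih =>
    intro inc
    simp only [pvInnerA]
    by_cases hmp : m = p
    · subst hmp
      rw [PySem.List.index?_cons_self]
      simp
    · rw [PySem.List.index?_cons_of_ne _ (Ne.symm hmp)]
      have hbeq : (m == p) = false := by simp [hmp]
      rw [hbeq]
      simp only [Bool.false_eq_true, if_false]
      rw [ih]
      cases PySem.List.index? rest m with
      | none => simp; ring
      | some j => simp; ring

lemma loop_eq (positive : List String) :
    ∀ (ms neg : List String),
      pvLoopA ms positive ((neg.length : Int) * (positive.length : Int)) neg =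
        pvFindB (pvBuildFirst (PySem.List.enumerate positive 0) PySem.Dict.empty)
          (positive.length : Int) (neg ++ ms) ms neg.length := by
  intro ms
  induction ms with
  | nil => intro neg; simp [pvLoopA, pvFindB]
  | cons m rest ih =>
    intro neg
    simp only [pvLoopA, pvFindB]
    rw [innerA_eq]
    rw [buildFirst_get? m positive 0 PySem.Dict.empty]
    simp only [PySem.Dict.get?_empty, Option.isSome_none, Bool.false_eq_true, if_false]
    cases hidx : PySem.List.index? positive m with
    | some j =>
      have htake : (neg ++ m :: rest).take neg.length = neg := by
        simp [List.take_append_of_le_length (le_refl neg.length)]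
      simp [htake]
    | none =>
      have harith : (neg.length : Int) * (positive.length : Int) + (positive.length : Int)
          = (((neg ++ [m]).length : Int)) * (positive.length : Int) := by
        simp; ring
      rw [harith]
      have := ih (neg ++ [m])
      simpa [List.append_assoc] using this

-- ===== VERDICT (by name: the statement is the Claim_ definition above) =====
theorem negative_markers1_spec : Claim_equal_negative_markers1 := by
  intro markers positive _
  unfold Spec_negative_markers1 negative_markers1 negative_markers1_alt
  have := loop_eq positive markers []
  simpa using this
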